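-- pv_equiv track=rewrite | github.com/SauravSinha76/scaler2 | class8/special_seq.py | solve
-- ===== SOURCE A (Python) =====
-- def solve(A):
--     n = len(A)
--     ans =0
--     c =0
--     for i in range(n-1,-1,-1):
--         if A[i] == 'G':
--             c += 1
--         elif A[i] == 'A':
--             ans += c
--     return ans
-- ===== SOURCE B (Python) =====
-- def solve(A):
--     pref = []
--     c = 0
--     for x in A:
--         pref.append(c)
--         if x == 'A':
--             c += 1
--     return sum(p for x, p in zip(A, pref) if x == 'G')
-- ===== Notes on version B (the rewrite author's own statement) =====
-- stated objective: alternative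
-- what changed: Replaces the single reverse index loop carrying two running counters with a two-pass scheme: a forward pass builds an explicit prefix table of 'A'-counts, then a separate pass sums the table entries at 'G' positions.
import Mathlib
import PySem

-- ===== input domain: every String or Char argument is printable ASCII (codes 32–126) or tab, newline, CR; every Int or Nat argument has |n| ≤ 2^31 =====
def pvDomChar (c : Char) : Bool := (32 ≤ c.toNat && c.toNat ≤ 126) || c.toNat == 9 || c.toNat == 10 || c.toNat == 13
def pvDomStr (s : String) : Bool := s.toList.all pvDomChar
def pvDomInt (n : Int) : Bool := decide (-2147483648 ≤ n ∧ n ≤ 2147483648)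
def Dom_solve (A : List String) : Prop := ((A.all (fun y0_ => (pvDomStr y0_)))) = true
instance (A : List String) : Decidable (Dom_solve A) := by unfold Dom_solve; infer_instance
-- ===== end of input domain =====

-- B replaces A's single reverse loop (running 'G' counter, accumulate at each 'A') with a
-- two-pass scheme: a forward pass builds an explicit prefix table of 'A'-counts, then a
-- separate pass sums the table entries at the 'G' positions. Alternative decomposition, same cost.

-- ===== PORT A =====
-- A's reverse index loop: for i in range(n-1,-1,-1), state (ans, c).
def solve (A : List String) : Int :=
  let n : Int := A.length
  let r := (PySem.List.pyRange (n - 1) (-1) (-1)).foldl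
    (fun (s : Int × Int) i =>
      let x := PySem.List.pyGetD A i ""
      if x = "G" then (s.1, s.2 + 1)
      else if x = "A" then (s.1 + s.2, s.2)
      else s) (0, 0)
  r.1

-- ===== PORT B =====
def solve_alt (A : List String) : Int :=
  let p := A.foldl
    (fun (s : List Int × Int) x =>
      (s.1 ++ [s.2], s.2 + if x = "A" then 1 else 0)) ([], 0)
  (((A.zip p.1).filter (fun xp => xp.1 = "G")).map (fun xp => xp.2)).sum

-- ===== PRECONDITION & SPEC =====
def Spec_solve (A : List String) (out : Int) : Prop := out = solve_alt A
instance (A : List String) (out : Int) : Decidable (Spec_solve A out) := by unfold Spec_solve; infer_instance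

-- ===== CLAIM (what is proved, stated in full; the proofs are below) =====
def Claim_equal_solve : Prop := ∀ (A : List String), Dom_solve A → Spec_solve A (solve A)

-- ===== LEMMAS AND PROOFS =====

-- number of "G"s / "A"s, recursively
def cntG : List String → Int
  | [] => 0
  | x :: t => cntG t + (if x = "G" then 1 else 0)
def cntA : List String → Int
  | [] => 0
  | x :: t => cntA t + (if x = "A" then 1 else 0)
-- number of (A-before-G) pairs, recursion peeling the FIRST element
def pairs : List String → Int
  | [] => 0
  | x :: t => pairs t + (if x = "A" then cntG t else 0)

-- A's loop body
def stepA (s : Int × Int) (x : String) : Int × Int :=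
  if x = "G" then (s.1, s.2 + 1)
  else if x = "A" then (s.1 + s.2, s.2)
  else s

lemma foldA_rev (xs : List String) : ∀ ans c : Int,
    xs.reverse.foldl stepA (ans, c) = (ans + pairs xs + c * cntA xs, c + cntG xs) := by
  induction xs with
  | nil => intro ans c; simp [pairs, cntA, cntG]
  | cons x t ih =>
    intro ans c
    rw [List.reverse_cons, List.foldl_append, ih]
    simp only [List.foldl, stepA, pairs, cntA, cntG]
    by_cases hg : x = "G"
    · simp [hg]; ring
    · by_cases ha : x = "A"
      · simp [ha]; ring
      · simp [hg, ha]

-- B's prefix table as a direct recursion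
def prefList (c : Int) : List String → List Int
  | [] => []
  | x :: t => c :: prefList (c + if x = "A" then 1 else 0) t

lemma foldB (xs : List String) : ∀ acc c,
    xs.foldl (fun (s : List Int × Int) x =>
      (s.1 ++ [s.2], s.2 + if x = "A" then 1 else 0)) (acc, c)
      = (acc ++ prefList c xs, c + cntA xs) := by
  induction xs with
  | nil => intro acc c; simp [prefList, cntA]
  | cons x t ih =>
    intro acc c
    simp only [List.foldl, ih, prefList, cntA, Prod.mk.injEq]
    constructor
    · simp
    · ring

lemma sumG (xs : List String) : ∀ c : Int,
    (((xs.zip (prefList c xs)).filter (fun xp => xp.1 = "G")).map (fun xp => xp.2)).sum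
      = c * cntG xs + pairs xs := by
  induction xs with
  | nil => intro c; simp [prefList, cntG, pairs]
  | cons x t ih =>
    intro c
    simp only [prefList, List.zip_cons_cons, List.filter_cons, pairs, cntG]
    by_cases h : x = "G"
    · simp [h, ih]; ring
    · simp [h, ih]; split_ifs <;> ring

lemma solve_eq_pairs (A : List String) : solve A = pairs A := by
  unfold solve
  have h1 : PySem.List.pyRange ((A.length : Int) - 1) (-1) (-1)
      = (PySem.List.pyRange 0 (A.length : Int) 1).reverse := by
    rw [PySem.List.pyRange_neg_one_eq_reverse]; norm_num
  have h2 : ∀ s : Int × Int, ∀ i : Int,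
      (let x := PySem.List.pyGetD A i ""
       if x = "G" then (s.1, s.2 + 1)
       else if x = "A" then (s.1 + s.2, s.2) else s) = stepA s (PySem.List.pyGetD A i "") := by
    intro s i; rfl
  simp only [h1, h2]
  rw [← List.foldl_map, List.map_reverse, PySem.List.map_pyGetD_pyRange_zero',
      foldA_rev A 0 0]
  simp

-- ===== VERDICT (by name: the statement is the Claim_ definition above) =====
theorem solve_spec : Claim_equal_solve := by
  intro A _
  unfold Spec_solve solve_alt
  rw [solve_eq_pairs]
  simp only [foldB, List.nil_append]
  rw [sumG A 0]
  ring
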